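-- pv_equiv track=rewrite | github.com/rizkyputra098/Thesis-Generative-Adversial-Network-with-Xoodyak- | xoodyak_core.py | _bytes_to_words
-- ===== SOURCE A (Python) =====
-- def _bytes_to_words(data):
--     """Convert bytes to 32-bit words (little-endian)"""
--     words = []
--     for i in range(0, len(data), 4):
--         word = 0
--         for j in range(min(4, len(data) - i)):
--             word |= (data[i + j] << (8 * j))
--         words.append(word)
--     return words
-- ===== SOURCE B (Python) =====
-- def _bytes_to_words(data):
--     """Convert bytes to 32-bit words (little-endian)"""
--     words = [0] * ((len(data) + 3) // 4)
--     for i, b in enumerate(data):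
--         k, j = divmod(i, 4)
--         words[k] |= b << (8 * j)
--     return words
-- ===== Notes on version B (the rewrite author's own statement) =====
-- stated objective: alternative
-- what changed: B preallocates the whole word table ((len+3)//4 zeros) and makes ONE flat pass over the bytes, scattering each byte into its word via divmod(i, 4), instead of A's nested loops that gather each word from its four bytes with per-word index arithmetic.
import Mathlib
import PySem

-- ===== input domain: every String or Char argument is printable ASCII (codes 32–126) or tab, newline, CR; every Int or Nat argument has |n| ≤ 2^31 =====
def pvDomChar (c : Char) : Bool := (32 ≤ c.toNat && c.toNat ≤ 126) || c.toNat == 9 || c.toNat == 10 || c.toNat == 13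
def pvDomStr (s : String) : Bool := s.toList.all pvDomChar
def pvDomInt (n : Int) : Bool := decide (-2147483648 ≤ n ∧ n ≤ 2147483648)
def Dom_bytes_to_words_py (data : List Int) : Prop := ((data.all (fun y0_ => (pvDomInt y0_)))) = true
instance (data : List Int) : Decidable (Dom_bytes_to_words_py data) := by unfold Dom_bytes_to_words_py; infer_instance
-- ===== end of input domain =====

-- B preallocates the word table and scatters each byte into its word in one flat
-- pass (divmod), instead of A's nested loops gathering each word from its bytes
-- (objective: alternative).

-- ===== PORT A =====
-- literal port of A: for i in range(0, len(data), 4): word |= data[i+j] << 8*j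
-- (index i+j is always in range, so pyGetD's default is never used; shift amount
-- 8*j has j ≥ 0 from range, so (8*j).toNat is exact)
def bytes_to_words_py (data : List Int) : List Int :=
  (PySem.List.pyRange 0 (PySem.List.len data) 4).foldl
    (fun words i =>
      let word :=
        (PySem.List.pyRange 0 (min 4 (PySem.List.len data - i)) 1).foldl
          (fun word j => PySem.Int.bor word (PySem.List.pyGetD data (i + j) 0 <<< (8 * j).toNat))
          0
      words ++ [word])
    []

-- ===== PORT B =====
-- port of Source B: words = [0] * ((len(data)+3)//4) (the count is nonnegative, so
-- .toNat is exact); for i, b in enumerate(data): k, j = divmod(i, 4);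
-- words[k] |= b << (8*j) -- ported as read (pyGetD) + List.set; the index k and
-- shift amount 8*j are nonnegative and k is always in range, so .toNat/set are exact
def bytes_to_words_py_alt (data : List Int) : List Int :=
  let words : List Int :=
    List.replicate (PySem.Int.floordiv (PySem.List.len data + 3) 4).toNat 0
  (PySem.List.enumerate data 0).foldl
    (fun (words : List Int) (ib : Int × Int) =>
      let k := PySem.Int.floordiv ib.1 4
      let j := PySem.Int.mod ib.1 4
      words.set k.toNat
        (PySem.Int.bor (PySem.List.pyGetD words k 0) (ib.2 <<< (8 * j).toNat)))
    words

-- ===== PRECONDITION & SPEC =====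
def Spec_bytes_to_words_py (data : List Int) (out : List Int) : Prop := out = bytes_to_words_py_alt data
instance (data : List Int) (out : List Int) : Decidable (Spec_bytes_to_words_py data out) := by unfold Spec_bytes_to_words_py; infer_instance

-- ===== CLAIM (what is proved, stated in full; the proofs are below) =====
def Claim_equal_bytes_to_words_py : Prop := ∀ (data : List Int), Dom_bytes_to_words_py data → Spec_bytes_to_words_py data (bytes_to_words_py data)

-- ===== LEMMAS AND PROOFS =====

-- ## Nat bit lemmas (used to characterise A's OR-accumulation)

lemma pv_and_div2 (a b : Nat) : (b &&& a) / 2 = (b / 2) &&& (a / 2) := by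
  apply Nat.eq_of_testBit_eq
  intro i
  rw [← Nat.testBit_succ, Nat.testBit_land, Nat.testBit_succ, Nat.testBit_succ,
    Nat.testBit_land]

lemma pv_and_mod2 (a b : Nat) : ((b &&& a) % 2 = 1) ↔ (b % 2 = 1 ∧ a % 2 = 1) := by
  have h := Nat.testBit_land b a 0
  simp only [Nat.testBit_zero] at h
  simpa using h

-- borrow-free subtraction of a submask, one binary digit at a time
lemma pv_sub_and_testBit (a b i : Nat) :
    (b - (b &&& a)).testBit i = (b.testBit i && !(a.testBit i)) := by
  induction i generalizing a b with
  | zero =>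
    have hle2 : (b &&& a) / 2 ≤ b / 2 := by rw [pv_and_div2]; exact Nat.and_le_left
    simp only [Nat.testBit_zero]
    by_cases hb : b % 2 = 1 <;> by_cases ha : a % 2 = 1
    · have hs : (b &&& a) % 2 = 1 := (pv_and_mod2 a b).mpr ⟨hb, ha⟩
      simp only [hb, ha]; simp; omega
    · have hs : (b &&& a) % 2 ≠ 1 := fun h => ha ((pv_and_mod2 a b).mp h).2
      simp only [hb, ha]; simp; omega
    · have hs : (b &&& a) % 2 ≠ 1 := fun h => hb ((pv_and_mod2 a b).mp h).1
      simp only [hb, ha]; simp; omega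
    · have hs : (b &&& a) % 2 ≠ 1 := fun h => hb ((pv_and_mod2 a b).mp h).1
      simp only [hb, ha]; simp; omega
  | succ i ih =>
    have hle2 : (b &&& a) / 2 ≤ b / 2 := by rw [pv_and_div2]; exact Nat.and_le_left
    have hm : (b &&& a) % 2 ≤ b % 2 := by
      by_cases h : (b &&& a) % 2 = 1
      · have := ((pv_and_mod2 a b).mp h).1; omega
      · omega
    have hsplit : (b - (b &&& a)) / 2 = b / 2 - (b &&& a) / 2 := by omega
    rw [Nat.testBit_succ, hsplit, pv_and_div2, ih, ← Nat.testBit_succ, ← Nat.testBit_succ]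

-- ## Int bit bridge

lemma pv_neg_cast_sub_one (n : Nat) : -((n : Int)) - 1 = Int.negSucc n := by
  rw [Int.negSucc_eq]; ring

lemma pv_testBit_negSucc (n : Nat) (i : Nat) : (Int.negSucc n).testBit i = !(n.testBit i) := rfl

lemma pv_testBit_natCast (n : Nat) (i : Nat) : ((n : Int)).testBit i = n.testBit i := rfl

lemma pv_negSucc_not_nonneg (n : Nat) : ¬ ((0:Int) ≤ Int.negSucc n) :=
  Int.not_le.mpr (Int.negSucc_lt_zero n)

lemma pv_neg_negSucc_sub_one (n : Nat) : -(Int.negSucc n) - 1 = ((n : Nat) : Int) := by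
  rw [Int.negSucc_eq]; ring

lemma pv_testBit_bor (a b : Int) (i : Nat) :
    (PySem.Int.bor a b).testBit i = (a.testBit i || b.testBit i) := by
  rcases a with m | m <;> rcases b with n | n
  · show (PySem.Int.bor (m : Int) (n : Int)).testBit i = _
    simp only [PySem.Int.bor, if_pos (Int.natCast_nonneg m), if_pos (Int.natCast_nonneg n),
      Int.toNat_natCast]
    simp [pv_testBit_natCast]
  · show (PySem.Int.bor (m : Int) (Int.negSucc n)).testBit i
      = ((m : Int).testBit i || (Int.negSucc n).testBit i)
    simp only [PySem.Int.bor, if_pos (Int.natCast_nonneg m), if_neg (pv_negSucc_not_nonneg n),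
      pv_neg_negSucc_sub_one, Int.toNat_natCast, pv_neg_cast_sub_one]
    rw [pv_testBit_negSucc, pv_sub_and_testBit, pv_testBit_natCast, pv_testBit_negSucc]
    cases m.testBit i <;> cases n.testBit i <;> rfl
  · show (PySem.Int.bor (Int.negSucc m) (n : Int)).testBit i
      = ((Int.negSucc m).testBit i || (n : Int).testBit i)
    simp only [PySem.Int.bor, if_neg (pv_negSucc_not_nonneg m), if_pos (Int.natCast_nonneg n),
      pv_neg_negSucc_sub_one, Int.toNat_natCast, pv_neg_cast_sub_one]
    rw [pv_testBit_negSucc, pv_sub_and_testBit, pv_testBit_natCast, pv_testBit_negSucc]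
    cases m.testBit i <;> cases n.testBit i <;> rfl
  · show (PySem.Int.bor (Int.negSucc m) (Int.negSucc n)).testBit i = _
    simp only [PySem.Int.bor, if_neg (pv_negSucc_not_nonneg m), if_neg (pv_negSucc_not_nonneg n),
      pv_neg_negSucc_sub_one, Int.toNat_natCast, pv_neg_cast_sub_one]
    rw [pv_testBit_negSucc, Nat.testBit_land, pv_testBit_negSucc, pv_testBit_negSucc]
    cases m.testBit i <;> cases n.testBit i <;> rfl

lemma pv_int_ext {x y : Int} (h : ∀ i, x.testBit i = y.testBit i) : x = y := by
  rcases x with m | m <;> rcases y with n | n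
  · exact congrArg Int.ofNat (Nat.eq_of_testBit_eq h)
  · exfalso
    have h1 : m.testBit (m + n) = false :=
      Nat.testBit_eq_false_of_lt (lt_of_lt_of_le Nat.lt_two_pow_self
        (Nat.pow_le_pow_right (by norm_num) (Nat.le_add_right m n)))
    have h2 : n.testBit (m + n) = false :=
      Nat.testBit_eq_false_of_lt (lt_of_lt_of_le Nat.lt_two_pow_self
        (Nat.pow_le_pow_right (by norm_num) (Nat.le_add_left n m)))
    have := h (m + n)
    rw [show (Int.ofNat m).testBit (m + n) = m.testBit (m + n) from rfl,
      pv_testBit_negSucc, h1, h2] at this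
    exact absurd this (by decide)
  · exfalso
    have h1 : m.testBit (m + n) = false :=
      Nat.testBit_eq_false_of_lt (lt_of_lt_of_le Nat.lt_two_pow_self
        (Nat.pow_le_pow_right (by norm_num) (Nat.le_add_right m n)))
    have h2 : n.testBit (m + n) = false :=
      Nat.testBit_eq_false_of_lt (lt_of_lt_of_le Nat.lt_two_pow_self
        (Nat.pow_le_pow_right (by norm_num) (Nat.le_add_left n m)))
    have := h (m + n)
    rw [show (Int.ofNat n).testBit (m + n) = n.testBit (m + n) from rfl,
      pv_testBit_negSucc, h1, h2] at this
    exact absurd this (by decide)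
  · have : m = n := by
      apply Nat.eq_of_testBit_eq
      intro i
      have := h i
      rw [pv_testBit_negSucc, pv_testBit_negSucc] at this
      exact Bool.not_inj this
    rw [this]

lemma pv_testBit_shl (x : Int) (n i : Nat) :
    (x <<< n).testBit i = (decide (n ≤ i) && x.testBit (i - n)) := by
  rcases x with m | m
  · show (((m : Int)) <<< n).testBit i = _
    rw [Int.shiftLeft_eq]
    have e : ((m : Int)) * 2 ^ n = ((m * 2 ^ n : Nat) : Int) := by push_cast; ring
    rw [e, pv_testBit_natCast, Nat.testBit_mul_two_pow]
    rfl
  · have hp : 1 ≤ 2 ^ n := Nat.one_le_two_pow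
    have hX : 1 ≤ (m + 1) * 2 ^ n := Nat.one_le_iff_ne_zero.mpr (by positivity)
    have e : (Int.negSucc m) <<< n = Int.negSucc ((m + 1) * 2 ^ n - 1) := by
      rw [Int.shiftLeft_eq, Int.negSucc_eq, Int.negSucc_eq]
      push_cast [hX]
      ring
    rw [e, pv_testBit_negSucc, pv_testBit_negSucc]
    have e2 : (m + 1) * 2 ^ n - 1 = 2 ^ n * m + (2 ^ n - 1) := by
      have : (m + 1) * 2 ^ n = 2 ^ n * m + 2 ^ n := by ring
      rw [this, Nat.add_sub_assoc hp]
    rw [e2, Nat.testBit_two_pow_mul_add m (Nat.sub_lt (by positivity) one_pos) i]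
    by_cases hni : i < n
    · have hn : ¬ n ≤ i := by omega
      simp [hni, hn, Nat.testBit_two_pow_sub_one]
    · have hn : n ≤ i := by omega
      simp [hni, hn]

lemma pv_bor_shl (x y : Int) (n : Nat) :
    (PySem.Int.bor x y) <<< n = PySem.Int.bor (x <<< n) (y <<< n) := by
  apply pv_int_ext
  intro i
  rw [pv_testBit_shl, pv_testBit_bor, pv_testBit_bor, pv_testBit_shl, pv_testBit_shl]
  cases decide (n ≤ i) <;> simp

lemma pv_bor_assoc (x y z : Int) :
    PySem.Int.bor (PySem.Int.bor x y) z = PySem.Int.bor x (PySem.Int.bor y z) := by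
  apply pv_int_ext
  intro i
  simp [pv_testBit_bor, Bool.or_assoc]

lemma pv_zero_bor (x : Int) : PySem.Int.bor 0 x = x := by
  rw [PySem.Int.bor_comm]; exact PySem.Int.bor_zero x

lemma pv_shl_shl (x : Int) (m n : Nat) : (x <<< m) <<< n = x <<< (m + n) := by
  simp [Int.shiftLeft_eq, pow_add, mul_assoc]

lemma pv_shl_zero (x : Int) : x <<< (0 : Nat) = x := by
  simp [Int.shiftLeft_eq]

-- ## A's word, characterised as an OR of the chunk's bytes

def pvOrW : List Int → Int
  | [] => 0
  | b :: t => PySem.Int.bor b (pvOrW t <<< (8 : Nat))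

lemma pv_foldl_bor {α : Type} (g : α → Int) (l : List α) (w : Int) :
    l.foldl (fun acc j => PySem.Int.bor acc (g j)) w
      = PySem.Int.bor w ((l.map g).foldr PySem.Int.bor 0) := by
  induction l generalizing w with
  | nil => simp [PySem.Int.bor_zero]
  | cons x t ih => simp [ih, pv_bor_assoc]

lemma pv_flatMap_singleton {α β : Type} (l : List α) (f : α → β) :
    l.flatMap (fun x => [f x]) = l.map f := by
  induction l with
  | nil => rfl
  | cons x t ih => simp [List.flatMap_cons, ih]

lemma pv_foldr_shifted (c : List Int) (s : Nat) :
    ((List.range c.length).map (fun k => c.getD k 0 <<< (s + 8 * k))).foldr PySem.Int.bor 0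
      = pvOrW c <<< s := by
  induction c generalizing s with
  | nil => simp [pvOrW]
  | cons b t ih =>
    rw [show (b :: t).length = t.length + 1 from rfl, List.range_succ_eq_map]
    rw [List.map_cons, List.map_map]
    have e : ((fun k => (b :: t).getD k 0 <<< (s + 8 * k)) ∘ Nat.succ)
        = (fun k => t.getD k 0 <<< ((s + 8) + 8 * k)) := by
      funext k
      show (b :: t).getD (k + 1) 0 <<< (s + 8 * (k + 1)) = t.getD k 0 <<< ((s + 8) + 8 * k)
      rw [List.getD_cons_succ]
      congr 1
      omega
    rw [e, List.foldr_cons, ih]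
    show PySem.Int.bor ((b :: t).getD 0 0 <<< (s + 8 * 0)) (pvOrW t <<< (s + 8))
      = pvOrW (b :: t) <<< s
    rw [List.getD_cons_zero, show s + 8 * 0 = s from by omega]
    show PySem.Int.bor (b <<< s) (pvOrW t <<< (s + 8))
      = (PySem.Int.bor b (pvOrW t <<< (8 : Nat))) <<< s
    rw [pv_bor_shl, pv_shl_shl (pvOrW t) 8 s, Nat.add_comm 8 s]

lemma pv_inner_eq (data : List Int) (i : Int) (h0 : 0 ≤ i) (hlt : i < (data.length : Int)) :
    (PySem.List.pyRange 0 (min 4 (PySem.List.len data - i)) 1).foldl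
        (fun word j => PySem.Int.bor word (PySem.List.pyGetD data (i + j) 0 <<< (8 * j).toNat)) 0
      = pvOrW ((data.drop i.toNat).take 4) := by
  set c : List Int := (data.drop i.toNat).take 4 with hc
  have hclen : c.length = min 4 (data.length - i.toNat) := by
    simp [hc]
  have hc4 : c.length ≤ 4 := by omega
  have hKc : min 4 (PySem.List.len data - i) = (c.length : Int) := by
    simp [PySem.List.len, hclen]
    omega
  rw [hKc, pv_foldl_bor, pv_zero_bor, PySem.List.pyRange_one, List.map_map]
  have hsub : ((c.length : Int) - 0).toNat = c.length := by omega
  rw [hsub]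
  have e : ∀ k ∈ List.range c.length,
      ((fun j => PySem.List.pyGetD data (i + j) 0 <<< (8 * j).toNat) ∘ (fun k : Nat => (0 : Int) + k)) k
        = (fun k : Nat => c.getD k 0 <<< (0 + 8 * k)) k := by
    intro k hk
    rw [List.mem_range] at hk
    show PySem.List.pyGetD data (i + ((0 : Int) + k)) 0 <<< (8 * ((0 : Int) + k)).toNat
      = c.getD k 0 <<< (0 + 8 * k)
    have e1 : (i + ((0 : Int) + k)) = i + (k : Int) := by ring
    have e2 : (8 * ((0 : Int) + k)).toNat = 0 + 8 * k := by omega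
    rw [e1, e2, PySem.List.pyGetD_of_nonneg data 0 (by omega)]
    congr 1
    have e3 : (i + (k : Int)).toNat = i.toNat + k := by omega
    rw [e3]
    have hk4 : k < 4 := by omega
    have hkl : i.toNat + k < data.length := by omega
    rw [List.getD_eq_getElem?_getD, List.getD_eq_getElem?_getD, hc,
      List.getElem?_take, if_pos hk4, List.getElem?_drop]
  rw [List.map_congr_left e, pv_foldr_shifted c 0, pv_shl_zero]

-- ## appending one byte to an OR-word

lemma pv_shl_zero_left (n : Nat) : (0 : Int) <<< n = 0 := by
  simp [Int.shiftLeft_eq]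

lemma pv_orW_append (c : List Int) (b : Int) :
    pvOrW (c ++ [b]) = PySem.Int.bor (pvOrW c) (b <<< (8 * c.length)) := by
  induction c with
  | nil =>
    show PySem.Int.bor b ((0 : Int) <<< (8 : Nat))
      = PySem.Int.bor 0 (b <<< (8 * List.length ([] : List Int)))
    rw [pv_shl_zero_left, PySem.Int.bor_zero, pv_zero_bor,
      show 8 * List.length ([] : List Int) = 0 from rfl, pv_shl_zero]
  | cons x t ih =>
    show PySem.Int.bor x (pvOrW (t ++ [b]) <<< (8 : Nat))
      = PySem.Int.bor (PySem.Int.bor x (pvOrW t <<< (8 : Nat))) (b <<< (8 * (x :: t).length))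
    rw [ih, pv_bor_shl, pv_shl_shl, pv_bor_assoc,
      show 8 * t.length + 8 = 8 * (x :: t).length from by
        rw [List.length_cons]; ring]

-- ## the scatter step: one byte lands in exactly one word of the table

lemma pv_step (xs : List Int) (b : Int) (nW : Nat) (h : xs.length < 4 * nW) :
    ((List.range nW).map (fun k => pvOrW ((xs.drop (4 * k)).take 4))).set
        (PySem.Int.floordiv ((0 : Int) + (xs.length : Int)) 4).toNat
        (PySem.Int.bor
          (PySem.List.pyGetD ((List.range nW).map (fun k => pvOrW ((xs.drop (4 * k)).take 4)))
            (PySem.Int.floordiv ((0 : Int) + (xs.length : Int)) 4) 0)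
          (b <<< (8 * PySem.Int.mod ((0 : Int) + (xs.length : Int)) 4).toNat))
      = (List.range nW).map (fun k => pvOrW (((xs ++ [b]).drop (4 * k)).take 4)) := by
  have hfd : PySem.Int.floordiv ((0 : Int) + (xs.length : Int)) 4 = ((xs.length / 4 : Nat) : Int) := by
    rw [PySem.Int.floordiv_eq_ediv_of_pos (by norm_num)]
    omega
  have hfdn : (PySem.Int.floordiv ((0 : Int) + (xs.length : Int)) 4).toNat = xs.length / 4 := by
    rw [hfd]; omega
  have hmd : (8 * PySem.Int.mod ((0 : Int) + (xs.length : Int)) 4).toNat = 8 * (xs.length % 4) := by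
    rw [PySem.Int.mod_eq_emod_of_pos (by norm_num)]
    omega
  have hk0 : xs.length / 4 < nW := by omega
  have hget : PySem.List.pyGetD ((List.range nW).map (fun k => pvOrW ((xs.drop (4 * k)).take 4)))
      (PySem.Int.floordiv ((0 : Int) + (xs.length : Int)) 4) 0
      = pvOrW ((xs.drop (4 * (xs.length / 4))).take 4) := by
    rw [hfd, PySem.List.pyGetD_natCast, List.getD_eq_getElem?_getD, List.getElem?_map,
      List.getElem?_range hk0]
    rfl
  rw [hget, hfdn, hmd]
  apply List.ext_getElem
  · simp
  · intro k hk1 hk2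
    rw [List.getElem_set]
    simp only [List.getElem_map, List.getElem_range]
    have hkW : k < nW := by simpa using hk2
    split_ifs with hek
    · -- the touched word: its chunk gains the byte b
      subst hek
      have hdrop : (xs ++ [b]).drop (4 * (xs.length / 4)) = xs.drop (4 * (xs.length / 4)) ++ [b] :=
        List.drop_append_of_le_length (by omega)
      have hlenc : (xs.drop (4 * (xs.length / 4))).length = xs.length % 4 := by
        rw [List.length_drop]; omega
      have htake1 : (xs.drop (4 * (xs.length / 4))).take 4 = xs.drop (4 * (xs.length / 4)) :=
        List.take_of_length_le (by omega)
      have htake2 : (xs.drop (4 * (xs.length / 4)) ++ [b]).take 4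
          = xs.drop (4 * (xs.length / 4)) ++ [b] :=
        List.take_of_length_le (by rw [List.length_append, hlenc]; simp; omega)
      rw [hdrop, htake2, htake1, pv_orW_append, hlenc]
    · -- every other word keeps its chunk
      rcases Nat.lt_or_ge k (xs.length / 4) with hlt | hge
      · have h4 : 4 * k + 4 ≤ xs.length := by omega
        rw [List.drop_append_of_le_length (by omega),
          List.take_append_of_le_length (by rw [List.length_drop]; omega)]
      · have hgt : xs.length / 4 < k := by omega
        have h1 : (xs ++ [b]).drop (4 * k) = [] :=
          List.drop_eq_nil_of_le (by rw [List.length_append]; simp; omega)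
        have h2 : xs.drop (4 * k) = [] := List.drop_eq_nil_of_le (by omega)
        rw [h1, h2]

-- ## the whole scatter loop builds exactly the chunk words

lemma pv_scatter (xs : List Int) (nW : Nat) (h : xs.length ≤ 4 * nW) :
    (PySem.List.enumerate xs 0).foldl
      (fun (words : List Int) (ib : Int × Int) =>
        words.set (PySem.Int.floordiv ib.1 4).toNat
          (PySem.Int.bor (PySem.List.pyGetD words (PySem.Int.floordiv ib.1 4) 0)
            (ib.2 <<< (8 * PySem.Int.mod ib.1 4).toNat)))
      (List.replicate nW 0)
      = (List.range nW).map (fun k => pvOrW ((xs.drop (4 * k)).take 4)) := by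
  induction xs using List.reverseRecOn with
  | nil =>
    rw [show PySem.List.enumerate ([] : List Int) 0 = [] from rfl, List.foldl_nil]
    apply List.ext_getElem
    · simp
    · intro k hk1 hk2
      simp [pvOrW]
  | append_singleton xs b ih =>
    rw [PySem.List.enumerate_append, List.foldl_append,
      ih (by rw [List.length_append] at h; simp at h; omega),
      show PySem.List.enumerate [b] ((0 : Int) + (xs.length : Int))
        = [(((0 : Int) + (xs.length : Int)), b)] from rfl,
      List.foldl_cons, List.foldl_nil]
    exact pv_step xs b nW (by rw [List.length_append] at h; simp at h; omega)

-- ## both ports reduce to the chunk words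

lemma pv_len_int (data : List Int) : PySem.List.len data = (data.length : Int) := by
  simp [PySem.List.len]

lemma pv_A_eq (data : List Int) :
    bytes_to_words_py data
      = (List.range ((data.length + 3) / 4)).map (fun t => pvOrW ((data.drop (4 * t)).take 4)) := by
  unfold bytes_to_words_py
  rw [PySem.List.foldl_append_eq_flatMap (fun i =>
    [(PySem.List.pyRange 0 (min 4 (PySem.List.len data - i)) 1).foldl
      (fun word j => PySem.Int.bor word
        (PySem.List.pyGetD data (i + j) 0 <<< (8 * j).toNat)) 0])]
  rw [List.nil_append, pv_flatMap_singleton]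
  rw [show PySem.List.pyRange 0 (PySem.List.len data) 4
      = (List.range ((data.length + 3) / 4)).map (fun k : Nat => (0 : Int) + 4 * (k : Int)) from by
    rw [pv_len_int, PySem.List.pyRange_of_pos (s := 4) 0 ((data.length : Nat) : Int) (by norm_num)]
    have hcnt : (if (0 : Int) < ((data.length : Nat) : Int)
        then ((((data.length : Nat) : Int) - 0 + 4 - 1) / 4).toNat else 0)
        = (data.length + 3) / 4 := by
      split_ifs <;> omega
    rw [hcnt]]
  rw [List.map_map]
  apply List.map_congr_left
  intro t ht
  rw [List.mem_range] at ht
  have h4t : 4 * t < data.length := by omega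
  show (PySem.List.pyRange 0 (min 4 (PySem.List.len data - ((0 : Int) + 4 * (t : Int)))) 1).foldl
      (fun word j => PySem.Int.bor word
        (PySem.List.pyGetD data (((0 : Int) + 4 * (t : Int)) + j) 0 <<< (8 * j).toNat)) 0
    = pvOrW ((data.drop (4 * t)).take 4)
  rw [pv_inner_eq data ((0 : Int) + 4 * (t : Int)) (by omega) (by omega)]
  rw [show (((0 : Int) + 4 * (t : Int))).toNat = 4 * t from by omega]

lemma pv_B_eq (data : List Int) :
    bytes_to_words_py_alt data
      = (List.range ((data.length + 3) / 4)).map (fun t => pvOrW ((data.drop (4 * t)).take 4)) := by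
  show (PySem.List.enumerate data 0).foldl
      (fun (words : List Int) (ib : Int × Int) =>
        words.set (PySem.Int.floordiv ib.1 4).toNat
          (PySem.Int.bor (PySem.List.pyGetD words (PySem.Int.floordiv ib.1 4) 0)
            (ib.2 <<< (8 * PySem.Int.mod ib.1 4).toNat)))
      (List.replicate (PySem.Int.floordiv (PySem.List.len data + 3) 4).toNat 0)
    = _
  rw [show (PySem.Int.floordiv (PySem.List.len data + 3) 4).toNat = (data.length + 3) / 4 from by
    rw [pv_len_int, PySem.Int.floordiv_eq_ediv_of_pos (by norm_num)]
    omega]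
  exact pv_scatter data ((data.length + 3) / 4) (by omega)

-- ===== VERDICT (by name: the statement is the Claim_ definition above) =====
theorem bytes_to_words_py_spec : Claim_equal_bytes_to_words_py := by
  intro data _
  show bytes_to_words_py data = bytes_to_words_py_alt data
  rw [pv_A_eq data, pv_B_eq data]
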